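-- pv_equiv track=rewrite | github.com/pengooseDev/textmining | _src/ref/DLB04/S15.py | document_features
-- ===== SOURCE A (Python) =====
-- def document_features(document, word_features):
--     word_count = {}
--     for word in document:  # document에 있는 단어들에 대해 빈도수를 먼저 계산
--         word_count[word] = word_count.get(word, 0) + 1
--
--     features = []
--     for word in word_features:  # word_features의 단어에 대해 계산된 빈도수를 feature에 추가
--         features.append(word_count.get(word, 0))  # 빈도가 없는 단어는 0을 입력
--     return features
-- ===== SOURCE B (Python) =====
-- def document_features(document, word_features):
--     # Inverted index over the vocabulary, then ONE pass over the document
--     # writing into a preallocated output array (no document frequency table).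
--     positions = {}
--     for i, w in enumerate(word_features):
--         positions.setdefault(w, []).append(i)
--     counts = [0] * len(word_features)
--     for word in document:
--         for i in positions.get(word, []):
--             counts[i] += 1
--     return counts
-- ===== Notes on version B (the rewrite author's own statement) =====
-- stated objective: alternative
-- what changed: Inverts the data flow: instead of building a document-frequency dict and then looking each feature up, B builds an inverted index from feature words to their output positions and makes a single pass over the document, incrementing slots of a preallocated counts array.
import Mathlib
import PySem

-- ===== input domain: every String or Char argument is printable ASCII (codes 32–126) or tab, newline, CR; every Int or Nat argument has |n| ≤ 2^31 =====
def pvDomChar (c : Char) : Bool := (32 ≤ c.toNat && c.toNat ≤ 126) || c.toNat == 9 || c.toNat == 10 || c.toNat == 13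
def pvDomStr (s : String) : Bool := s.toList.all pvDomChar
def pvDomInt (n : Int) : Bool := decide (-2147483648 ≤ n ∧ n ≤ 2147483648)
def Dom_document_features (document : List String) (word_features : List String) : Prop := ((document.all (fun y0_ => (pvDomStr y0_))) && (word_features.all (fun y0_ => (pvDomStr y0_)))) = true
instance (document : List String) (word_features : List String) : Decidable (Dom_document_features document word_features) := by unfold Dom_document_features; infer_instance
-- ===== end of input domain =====

-- B inverts A's data flow: an inverted index from feature words to output positions plus a single
-- document pass into a preallocated counts array, instead of a document-frequency dict then lookups
-- (objective: alternative, same asymptotic cost).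


-- ===== PORT A =====
def document_features (document : List String) (word_features : List String) : List Int :=
  let word_count := document.foldl (fun d word => d.insert word (d.getD word 0 + 1)) PySem.Dict.empty
  word_features.foldl (fun features word => features ++ [word_count.getD word 0]) []

-- ===== PORT B =====
-- positions.setdefault(w, []).append(i) is ported as modify w [] (· ++ [i]) — exact: it sets
-- positions[w] to positions.get(w, []) with i appended. counts[i] += 1 is ported as
-- set i.toNat (getD i.toNat 0 + 1): exact here, since every index the inverted dict holds
-- comes from enumerate(word_features) and is nonnegative and in range.
def document_features_alt (document : List String) (word_features : List String) : List Int :=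
  let positions := (PySem.List.enumerate word_features).foldl
      (fun d p => d.modify p.2 [] (fun l => l ++ [p.1])) PySem.Dict.empty
  let counts : List Int := List.replicate word_features.length 0
  document.foldl
    (fun cs word => (positions.getD word []).foldl
        (fun cs i => cs.set i.toNat (cs.getD i.toNat 0 + 1)) cs)
    counts

-- ===== PRECONDITION & SPEC =====
def Spec_document_features (document : List String) (word_features : List String) (out : List Int) : Prop := out = document_features_alt document word_features
instance (document : List String) (word_features : List String) (out : List Int) : Decidable (Spec_document_features document word_features out) := by unfold Spec_document_features; infer_instance

-- ===== CLAIM (what is proved, stated in full; the proofs are below) =====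
def Claim_equal_document_features : Prop := ∀ (document : List String) (word_features : List String), Dom_document_features document word_features → Spec_document_features document word_features (document_features document word_features)

-- ===== LEMMAS AND PROOFS =====

-- the inverted index maps w to the ordered list of positions of w in word_features
lemma positions_getD (wf : List String) (w : String) :
    (((PySem.List.enumerate wf).foldl
        (fun d p => d.modify p.2 [] (fun l => l ++ [p.1])) PySem.Dict.empty).getD w [])
      = ((PySem.List.enumerate wf).filter (fun p => p.2 == w)).map (·.1) := by
  have h := PySem.Dict.getD_foldl_modify_append
      (l := (PySem.List.enumerate wf).map Prod.swap) (d := PySem.Dict.empty) (c := w)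
  rw [List.foldl_map] at h
  simpa [List.filter_map, Function.comp] using h

lemma mem_positions (wf : List String) (w : String) (j : Int) :
    j ∈ ((PySem.List.enumerate wf).filter (fun p => p.2 == w)).map (·.1)
      ↔ ∃ (k : Nat) (hk : k < wf.length), (j : Int) = k ∧ wf[k] = w := by
  simp only [List.mem_map, List.mem_filter, PySem.List.mem_enumerate_iff]
  constructor
  · rintro ⟨p, ⟨⟨k, hk, rfl⟩, hw⟩, rfl⟩
    exact ⟨k, hk, by simp, by simpa using hw⟩
  · rintro ⟨k, hk, rfl, hw⟩
    exact ⟨((k : Int), wf[k]), ⟨⟨k, hk, by simp⟩, by simpa using hw⟩, rfl⟩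

lemma nodup_positions (wf : List String) (w : String) :
    (((PySem.List.enumerate wf).filter (fun p => p.2 == w)).map (·.1)).Nodup := by
  have hsub : List.Sublist (((PySem.List.enumerate wf).filter (fun p => p.2 == w)).map (·.1))
      ((PySem.List.enumerate wf).map (·.1)) :=
    List.Sublist.map _ List.filter_sublist
  have hnd : ((PySem.List.enumerate wf).map (·.1)).Nodup := by
    rw [PySem.List.map_fst_enumerate]
    exact PySem.List.nodup_pyRange_one 0 _
  exact hnd.sublist hsub

lemma count_positions (wf : List String) (w : String) (j : Nat) (hj : j < wf.length) :
    (((PySem.List.enumerate wf).filter (fun p => p.2 == w)).map (·.1)).count (j : Int)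
      = if wf[j] = w then 1 else 0 := by
  by_cases h : wf[j] = w
  · rw [List.count_eq_one_of_mem (nodup_positions wf w)
      ((mem_positions wf w j).2 ⟨j, hj, rfl, h⟩)]
    simp [h]
  · rw [List.count_eq_zero_of_not_mem]
    · simp [h]
    · intro hm
      rcases (mem_positions wf w j).1 hm with ⟨k, hk, hjk, hw⟩
      have : j = k := by exact_mod_cast hjk
      exact h (this ▸ hw)

-- the inner increment loop, pointwise
lemma inner_foldl_getD (is : List Int) (cs : List Int) (j : Nat)
    (hall : ∀ i ∈ is, 0 ≤ i ∧ i.toNat < cs.length) :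
    (is.foldl (fun cs i => cs.set i.toNat (cs.getD i.toNat 0 + 1)) cs).getD j 0
      = cs.getD j 0 + (is.count (j : Int) : Int) := by
  induction is generalizing cs with
  | nil => simp
  | cons i t ih =>
    obtain ⟨hi0, hilt⟩ := hall i (List.mem_cons_self ..)
    have hlen : (cs.set i.toNat (cs.getD i.toNat 0 + 1)).length = cs.length := by simp
    rw [List.foldl_cons, ih _ (fun x hx => by rw [hlen]; exact hall x (List.mem_cons_of_mem _ hx))]
    by_cases hij : i.toNat = j
    · subst hij
      rw [List.getD_eq_getElem _ _ (by simpa using hilt)]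
      simp [hilt, hi0]
      ring
    · have hne : ¬ ((j : Int)) == i := by simp; omega
      rw [show (cs.set i.toNat (cs.getD i.toNat 0 + 1)).getD j 0 = cs.getD j 0 from by
        simp [List.getD, List.getElem?_set_ne hij]]
      simp [List.count_cons]
      omega

lemma inner_foldl_length (is : List Int) (cs : List Int) :
    (is.foldl (fun cs i => cs.set i.toNat (cs.getD i.toNat 0 + 1)) cs).length = cs.length := by
  induction is generalizing cs with
  | nil => rfl
  | cons i t ih => rw [List.foldl_cons, ih]; simp

lemma positions_mem_bounds (wf : List String) (w : String) (i : Int)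
    (hi : i ∈ (((PySem.List.enumerate wf).foldl
        (fun d p => d.modify p.2 [] (fun l => l ++ [p.1])) PySem.Dict.empty).getD w [])) :
    0 ≤ i ∧ i.toNat < wf.length := by
  rw [positions_getD] at hi
  rcases (mem_positions wf w i).1 hi with ⟨k, hk, rfl, _⟩
  simp [hk]

lemma outer_foldl_length (doc wf : List String) (cs : List Int) :
    (doc.foldl (fun cs word =>
        ((((PySem.List.enumerate wf).foldl
            (fun d p => d.modify p.2 [] (fun l => l ++ [p.1])) PySem.Dict.empty).getD word []).foldl
          (fun cs i => cs.set i.toNat (cs.getD i.toNat 0 + 1)) cs)) cs).length = cs.length := by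
  induction doc generalizing cs with
  | nil => rfl
  | cons w rest ih => rw [List.foldl_cons, ih, inner_foldl_length]

lemma outer_foldl_getD (doc wf : List String) (cs : List Int) (j : Nat)
    (hj : j < wf.length) (hlen : cs.length = wf.length) :
    (doc.foldl (fun cs word =>
        ((((PySem.List.enumerate wf).foldl
            (fun d p => d.modify p.2 [] (fun l => l ++ [p.1])) PySem.Dict.empty).getD word []).foldl
          (fun cs i => cs.set i.toNat (cs.getD i.toNat 0 + 1)) cs)) cs).getD j 0
      = cs.getD j 0 + (doc.count wf[j] : Int) := by
  induction doc generalizing cs with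
  | nil => simp
  | cons w rest ih =>
    have hall : ∀ i ∈ (((PySem.List.enumerate wf).foldl
        (fun d p => d.modify p.2 [] (fun l => l ++ [p.1])) PySem.Dict.empty).getD w []),
        0 ≤ i ∧ i.toNat < cs.length := by
      intro i hi
      have := positions_mem_bounds wf w i hi
      omega
    rw [List.foldl_cons, ih _ (by rw [inner_foldl_length]; exact hlen),
      inner_foldl_getD _ _ _ hall, positions_getD, count_positions wf w j hj,
      List.count_cons]
    by_cases h : wf[j] = w
    · simp only [h, beq_self_eq_true, if_pos]
      push_cast
      ring
    · have hne : (w == wf[j]) = false := by simpa using Ne.symm h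
      rw [if_neg h, hne]
      push_cast
      ring

-- ===== VERDICT (by name: the statement is the Claim_ definition above) =====
theorem document_features_spec : Claim_equal_document_features := by
  intro document wf _
  unfold Spec_document_features document_features document_features_alt
  rw [PySem.List.foldl_append_singleton_eq_map]
  show (([] : List Int) ++ wf.map (fun word =>
      (document.foldl (fun d word => d.insert word (d.getD word 0 + 1)) PySem.Dict.empty).getD word 0))
    = document.foldl
        (fun cs word => ((((PySem.List.enumerate wf).foldl
            (fun d p => d.modify p.2 [] (fun l => l ++ [p.1])) PySem.Dict.empty).getD word []).foldl
          (fun cs i => cs.set i.toNat (cs.getD i.toNat 0 + 1)) cs))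
        (List.replicate wf.length (0 : Int))
  rw [List.nil_append]
  apply List.ext_getElem
  · rw [List.length_map, outer_foldl_length, List.length_replicate]
  · intro j hj hj'
    have hjw : j < wf.length := by simpa using hj
    have hlen : (List.replicate wf.length (0 : Int)).length = wf.length := by simp
    rw [List.getElem_map, ← List.getD_eq_getElem _ 0 hj',
      outer_foldl_getD document wf _ j hjw hlen,
      PySem.Dict.getD_foldl_insert_add_one, PySem.Dict.getD_empty]
    simp [hjw]
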